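-- pv_equiv track=rewrite | github.com/heroi17/spbu-python-course | project/generators/rgba_gen.py | get_rgba_vec
-- ===== SOURCE A (Python) =====
-- from typing import Generator
--
-- def get_rgba_generator() -> Generator[tuple[int, int, int, int], None, None]:
--     """
--     -------
--     Explanation
--     -------
--     Returns a generator which yields rgba_vec tuples.
--
--
--     The output is in the format (R, G, B, A), where:
--     - R: Red component (0-255)
--     - G: Green component (0-255)
--     - B: Blue component (0-255)
--     - A: Alpha transparency component (0, 2, 4, ..., 100)
--
--     -------
--     Yields:
--     -------
--     tuple[int, int, int, int]
--         A tuple representing an RGBA color (R, G, B, A).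
--
--     -------
--     Example:
--     -------
--     gen = get_rgba_gen()
--     next(gen)
--     (0, 0, 0, 0)
--     next(gen)
--     (0, 0, 0, 2)
--     next(gen)
--     (0, 0, 0, 4)
--
--     next(gen)
--     (0, 0, 255, 100)
--     next(gen)
--     (0, 1, 0, 0)
--     """
--     return (
--         (r, g, b, a)
--         for r in range(256)
--         for g in range(256)
--         for b in range(256)
--         for a in range(0, 101)
--         if a % 2 == 0
--     )
--
-- def get_rgba_vec(index: int) -> tuple[int, int, int, int]:
--     """
--     -------
--     Explanation:
--     -------
--     Returns the rgba_vec tuple at the given index.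
--     Indexing starts at 0.
--
--     -------
--     Args:
--     -------
--     index: int
--         Index of the rgba_vec in the sequence.
--
--     -------
--     Returns:
--     -------
--     tuple[int, int, int, int]
--         The rgba_vec at the specified index.
--     """
--     if index < 0:
--         raise IndexError(f"Index of rgba_vec can not be negative: {index}")
--
--     if index >= 256**3 * 51:
--         raise IndexError(f"There no rgba_vec with too big index such as yurs: {index}")
--     i = 0
--     for vec in get_rgba_generator():
--         if i == index:
--             return vec
--         i += 1
--
--     raise IndexError(f"Error that can not happen(it's for mypy)")
-- ===== SOURCE B (Python) =====
-- def get_rgba_vec(index: int) -> tuple[int, int, int, int]: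
--     """Return the index-th RGBA tuple by mixed-radix decomposition (O(1))."""
--     if index < 0:
--         raise IndexError(f"Index of rgba_vec can not be negative: {index}")
--     if index >= 256**3 * 51:
--         raise IndexError(f"There no rgba_vec with too big index such as yurs: {index}")
--     q, a = divmod(index, 51)
--     q, b = divmod(q, 256)
--     r, g = divmod(q, 256)
--     return (r, g, b, 2 * a)
-- ===== Notes on version B (the rewrite author's own statement) =====
-- stated objective: faster
-- what changed: Replaces the O(index) scan through the nested-loop generator with a closed-form mixed-radix (51,256,256,256) divmod decomposition.
import Mathlib
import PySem

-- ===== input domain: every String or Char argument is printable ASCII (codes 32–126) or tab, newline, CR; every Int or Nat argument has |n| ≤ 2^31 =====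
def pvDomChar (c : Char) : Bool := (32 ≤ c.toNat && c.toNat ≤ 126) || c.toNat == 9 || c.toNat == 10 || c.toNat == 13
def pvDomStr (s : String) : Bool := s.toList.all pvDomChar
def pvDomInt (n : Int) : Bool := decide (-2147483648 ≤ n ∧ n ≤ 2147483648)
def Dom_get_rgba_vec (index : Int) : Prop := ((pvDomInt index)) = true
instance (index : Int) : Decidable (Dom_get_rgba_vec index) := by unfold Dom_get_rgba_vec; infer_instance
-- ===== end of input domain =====

-- B replaces A's O(index) scan through the nested-loop RGBA generator with a closed-form
-- mixed-radix (51,256,256,256) divmod decomposition (objective: faster, asymptotic).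

-- ===== PORT A =====
-- A iterates the generator `(r,g,b,a) for r in range(256) for g in range(256)
-- for b in range(256) for a in range(0,101) if a % 2 == 0`, counting with i and
-- returning the tuple once i == index. Ported as four nested early-exit loops over
-- the same ranges, threading the counter i; each loop returns (found tuple or none,
-- updated counter).

def aLoopA (index r g b : Int) (i : Int) : List Int → Option (List Int) × Int
  | [] => (none, i)
  | a :: rest =>
    if PySem.Int.mod a 2 = 0 then
      if i = index then (some [r, g, b, a], i) else aLoopA index r g b (i + 1) rest
    else aLoopA index r g b i rest

def bLoopA (index r g : Int) (i : Int) : List Int → Option (List Int) × Int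
  | [] => (none, i)
  | b :: rest =>
    match aLoopA index r g b i (PySem.List.pyRange 0 101 1) with
    | (some v, i') => (some v, i')
    | (none, i') => bLoopA index r g i' rest

def gLoopA (index r : Int) (i : Int) : List Int → Option (List Int) × Int
  | [] => (none, i)
  | g :: rest =>
    match bLoopA index r g i (PySem.List.pyRange 0 256 1) with
    | (some v, i') => (some v, i')
    | (none, i') => gLoopA index r i' rest

def rLoopA (index : Int) (i : Int) : List Int → Option (List Int) × Int
  | [] => (none, i)
  | r :: rest =>
    match gLoopA index r i (PySem.List.pyRange 0 256 1) with
    | (some v, i') => (some v, i')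
    | (none, i') => rLoopA index i' rest

def get_rgba_vec (index : Int) : List Int :=
  if index < 0 then []                      -- Python: raise IndexError (excluded by Pre_)
  else if 855638016 ≤ index then []         -- Python: raise IndexError (excluded by Pre_); 855638016 = 256^3 * 51
  else
    match rLoopA index 0 (PySem.List.pyRange 0 256 1) with
    | (some v, _) => v
    | (none, _) => []                       -- Python: unreachable raise

-- ===== PORT B =====
def get_rgba_vec_alt (index : Int) : List Int :=
  if index < 0 then []                      -- Python: raise IndexError (excluded by Pre_)
  else if 855638016 ≤ index then []         -- Python: raise IndexError (excluded by Pre_)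
  else
    let q1 := PySem.Int.floordiv index 51
    let a  := PySem.Int.mod index 51
    let q2 := PySem.Int.floordiv q1 256
    let b  := PySem.Int.mod q1 256
    let r  := PySem.Int.floordiv q2 256
    let g  := PySem.Int.mod q2 256
    [r, g, b, 2 * a]

-- ===== PRECONDITION & SPEC =====
-- Pre_ excludes exactly the inputs where A raises IndexError: negative index or index ≥ 256^3 * 51.
def Pre_get_rgba_vec (index : Int) : Prop := 0 ≤ index ∧ index < 855638016
instance (index : Int) : Decidable (Pre_get_rgba_vec index) := by unfold Pre_get_rgba_vec; infer_instance

def pvWitness_get_rgba_vec : Int := 12345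

def Spec_get_rgba_vec (index : Int) (out : List Int) : Prop := out = get_rgba_vec_alt index
instance (index : Int) (out : List Int) : Decidable (Spec_get_rgba_vec index out) := by unfold Spec_get_rgba_vec; infer_instance

-- ===== CLAIM (what is proved, stated in full; the proofs are below) =====
def Claim_equal_get_rgba_vec : Prop := ∀ (index : Int), Dom_get_rgba_vec index → Pre_get_rgba_vec index → Spec_get_rgba_vec index (get_rgba_vec index)

-- ===== LEMMAS AND PROOFS =====

-- the alpha loop over range(0,101) with the parity filter, started k even values before the end
lemma aLoop_range (index r g b : Int) :
    ∀ (k : Nat), k ≤ 51 → ∀ (i : Int),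
      aLoopA index r g b i (PySem.List.pyRange (102 - 2 * (k : Int)) 101 1) =
        if i ≤ index ∧ index < i + (k : Int) then
          (some [r, g, b, 102 - 2 * (k : Int) + 2 * (index - i)], index)
        else (none, i + (k : Int)) := by
  intro k
  induction k with
  | zero =>
    intro _ i
    rw [PySem.List.pyRange_one_eq_nil (by norm_num)]
    simp only [aLoopA, Nat.cast_zero]
    rw [if_neg (by omega)]
    norm_num
  | succ k ih =>
    intro hk i
    have hs : ((k + 1 : Nat) : Int) = (k : Int) + 1 := by push_cast; ring
    rw [hs]
    rw [PySem.List.pyRange_one_cons (by omega)]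
    simp only [aLoopA]
    rw [if_pos (by rw [PySem.Int.mod_eq_zero_iff_dvd]; omega)]
    by_cases hi : i = index
    · rw [if_pos hi]
      subst hi
      rw [if_pos (by omega)]
      simp only [Prod.mk.injEq, Option.some.injEq, List.cons.injEq, true_and, and_true]
      all_goals omega
    · rw [if_neg hi]
      rw [show (102 - 2 * ((k:Int) + 1) + 1) = 101 - 2 * (k:Int) by ring]
      rcases Nat.eq_zero_or_pos k with hk0 | hkpos
      · subst hk0
        rw [show (101 - 2 * ((0:Nat):Int)) = 101 by norm_num]
        rw [PySem.List.pyRange_one_eq_nil (by norm_num)]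
        simp only [aLoopA, Nat.cast_zero]
        rw [if_neg (by omega)]
        simp only [Prod.mk.injEq, true_and]
        all_goals omega
      · rw [PySem.List.pyRange_one_cons (by omega)]
        simp only [aLoopA]
        rw [if_neg (by rw [PySem.Int.mod_eq_zero_iff_dvd]; omega)]
        rw [show (101 - 2 * (k:Int) + 1) = 102 - 2 * (k:Int) by ring]
        rw [ih (by omega) (i + 1)]
        by_cases hcond : i ≤ index ∧ index < i + ((k:Int) + 1)
        · rw [if_pos (by omega), if_pos (by omega)]
          simp only [Prod.mk.injEq, Option.some.injEq, List.cons.injEq, true_and, and_true]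
          all_goals omega
        · rw [if_neg (by omega), if_neg (by omega)]
          simp only [Prod.mk.injEq, true_and]
          all_goals omega

-- the blue loop over range(256), started m values before the end; window 51 per b value
lemma bLoop_range (index r g : Int) :
    ∀ (m : Nat), m ≤ 256 → ∀ (i : Int),
      bLoopA index r g i (PySem.List.pyRange (256 - (m : Int)) 256 1) =
        if i ≤ index ∧ index < i + 51 * (m : Int) then
          (some [r, g, 256 - (m : Int) + PySem.Int.floordiv (index - i) 51,
                 2 * PySem.Int.mod (index - i) 51], index)
        else (none, i + 51 * (m : Int)) := by
  intro m
  induction m with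
  | zero =>
    intro _ i
    rw [PySem.List.pyRange_one_eq_nil (by norm_num)]
    simp only [bLoopA, Nat.cast_zero]
    rw [if_neg (by omega)]
    norm_num
  | succ m ih =>
    intro hm i
    have hs : ((m + 1 : Nat) : Int) = (m : Int) + 1 := by push_cast; ring
    rw [hs]
    rw [PySem.List.pyRange_one_cons (by omega)]
    simp only [bLoopA]
    have ha := aLoop_range index r g (256 - ((m:Int) + 1)) 51 (le_refl _) i
    rw [show (102 - 2 * ((51:Nat):Int)) = 0 by norm_num] at ha
    push_cast at ha
    rw [ha]
    have e1 := PySem.Int.floordiv_mul_add_mod (index - i) 51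
    have p1 := PySem.Int.mod_nonneg (index - i) (by norm_num : (0:Int) < 51)
    have p2 := PySem.Int.mod_lt (index - i) (by norm_num : (0:Int) < 51)
    by_cases hfound : i ≤ index ∧ index < i + 51
    · rw [if_pos hfound]
      simp only []
      rw [if_pos (by omega)]
      simp only [Prod.mk.injEq, Option.some.injEq, List.cons.injEq, true_and, and_true]
      all_goals omega
    · rw [if_neg hfound]
      simp only []
      rw [show (256 - ((m:Int) + 1) + 1) = 256 - (m:Int) by ring]
      rw [ih (by omega) (i + 51)]
      have e2 := PySem.Int.floordiv_mul_add_mod (index - (i + 51)) 51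
      have p3 := PySem.Int.mod_nonneg (index - (i + 51)) (by norm_num : (0:Int) < 51)
      have p4 := PySem.Int.mod_lt (index - (i + 51)) (by norm_num : (0:Int) < 51)
      by_cases hcond : i ≤ index ∧ index < i + 51 * ((m:Int) + 1)
      · rw [if_pos (by omega), if_pos (by omega)]
        simp only [Prod.mk.injEq, Option.some.injEq, List.cons.injEq, true_and, and_true]
        all_goals omega
      · rw [if_neg (by omega), if_neg (by omega)]
        simp only [Prod.mk.injEq, true_and]
        all_goals omega

-- the green loop over range(256); window 51*256 = 13056 per g value
lemma gLoop_range (index r : Int) :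
    ∀ (m : Nat), m ≤ 256 → ∀ (i : Int),
      gLoopA index r i (PySem.List.pyRange (256 - (m : Int)) 256 1) =
        if i ≤ index ∧ index < i + 13056 * (m : Int) then
          (some [r, 256 - (m : Int) + PySem.Int.floordiv (index - i) 13056,
                 PySem.Int.floordiv (PySem.Int.mod (index - i) 13056) 51,
                 2 * PySem.Int.mod (PySem.Int.mod (index - i) 13056) 51], index)
        else (none, i + 13056 * (m : Int)) := by
  intro m
  induction m with
  | zero =>
    intro _ i
    rw [PySem.List.pyRange_one_eq_nil (by norm_num)]
    simp only [gLoopA, Nat.cast_zero]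
    rw [if_neg (by omega)]
    norm_num
  | succ m ih =>
    intro hm i
    have hs : ((m + 1 : Nat) : Int) = (m : Int) + 1 := by push_cast; ring
    rw [hs]
    rw [PySem.List.pyRange_one_cons (by omega)]
    simp only [gLoopA]
    have hb := bLoop_range index r (256 - ((m:Int) + 1)) 256 (le_refl _) i
    rw [show (256 - ((256:Nat):Int)) = 0 by norm_num] at hb
    push_cast at hb
    rw [hb]
    have e1 := PySem.Int.floordiv_mul_add_mod (index - i) 13056
    have p1 := PySem.Int.mod_nonneg (index - i) (by norm_num : (0:Int) < 13056)
    have p2 := PySem.Int.mod_lt (index - i) (by norm_num : (0:Int) < 13056)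
    by_cases hfound : i ≤ index ∧ index < i + 13056
    · rw [if_pos hfound]
      simp only []
      rw [if_pos (by omega)]
      have hmod : PySem.Int.mod (index - i) 13056 = index - i := by omega
      rw [hmod]
      simp only [Prod.mk.injEq, Option.some.injEq, List.cons.injEq, true_and, and_true]
      all_goals omega
    · rw [if_neg hfound]
      simp only []
      rw [show (256 - ((m:Int) + 1) + 1) = 256 - (m:Int) by ring]
      rw [ih (by omega) (i + 13056)]
      have e2 := PySem.Int.floordiv_mul_add_mod (index - (i + 13056)) 13056
      have p3 := PySem.Int.mod_nonneg (index - (i + 13056)) (by norm_num : (0:Int) < 13056)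
      have p4 := PySem.Int.mod_lt (index - (i + 13056)) (by norm_num : (0:Int) < 13056)
      by_cases hcond : i ≤ index ∧ index < i + 13056 * ((m:Int) + 1)
      · rw [if_pos (by omega), if_pos (by omega)]
        have hmod : PySem.Int.mod (index - (i + 13056)) 13056 = PySem.Int.mod (index - i) 13056 := by omega
        rw [hmod]
        simp only [Prod.mk.injEq, Option.some.injEq, List.cons.injEq, true_and, and_true]
        all_goals omega
      · rw [if_neg (by omega), if_neg (by omega)]
        simp only [Prod.mk.injEq, true_and]
        all_goals omega

-- the red loop over range(256); window 51*256*256 = 3342336 per r value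
lemma rLoop_range (index : Int) :
    ∀ (m : Nat), m ≤ 256 → ∀ (i : Int),
      rLoopA index i (PySem.List.pyRange (256 - (m : Int)) 256 1) =
        if i ≤ index ∧ index < i + 3342336 * (m : Int) then
          (some [256 - (m : Int) + PySem.Int.floordiv (index - i) 3342336,
                 PySem.Int.floordiv (PySem.Int.mod (index - i) 3342336) 13056,
                 PySem.Int.floordiv (PySem.Int.mod (PySem.Int.mod (index - i) 3342336) 13056) 51,
                 2 * PySem.Int.mod (PySem.Int.mod (PySem.Int.mod (index - i) 3342336) 13056) 51], index)
        else (none, i + 3342336 * (m : Int)) := by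
  intro m
  induction m with
  | zero =>
    intro _ i
    rw [PySem.List.pyRange_one_eq_nil (by norm_num)]
    simp only [rLoopA, Nat.cast_zero]
    rw [if_neg (by omega)]
    norm_num
  | succ m ih =>
    intro hm i
    have hs : ((m + 1 : Nat) : Int) = (m : Int) + 1 := by push_cast; ring
    rw [hs]
    rw [PySem.List.pyRange_one_cons (by omega)]
    simp only [rLoopA]
    have hg := gLoop_range index (256 - ((m:Int) + 1)) 256 (le_refl _) i
    rw [show (256 - ((256:Nat):Int)) = 0 by norm_num] at hg
    push_cast at hg
    rw [hg]
    have e1 := PySem.Int.floordiv_mul_add_mod (index - i) 3342336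
    have p1 := PySem.Int.mod_nonneg (index - i) (by norm_num : (0:Int) < 3342336)
    have p2 := PySem.Int.mod_lt (index - i) (by norm_num : (0:Int) < 3342336)
    by_cases hfound : i ≤ index ∧ index < i + 3342336
    · rw [if_pos hfound]
      simp only []
      rw [if_pos (by omega)]
      have hmod : PySem.Int.mod (index - i) 3342336 = index - i := by omega
      rw [hmod]
      simp only [Prod.mk.injEq, Option.some.injEq, List.cons.injEq, and_true]
      all_goals omega
    · rw [if_neg hfound]
      simp only []
      rw [show (256 - ((m:Int) + 1) + 1) = 256 - (m:Int) by ring]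
      rw [ih (by omega) (i + 3342336)]
      have e2 := PySem.Int.floordiv_mul_add_mod (index - (i + 3342336)) 3342336
      have p3 := PySem.Int.mod_nonneg (index - (i + 3342336)) (by norm_num : (0:Int) < 3342336)
      have p4 := PySem.Int.mod_lt (index - (i + 3342336)) (by norm_num : (0:Int) < 3342336)
      by_cases hcond : i ≤ index ∧ index < i + 3342336 * ((m:Int) + 1)
      · rw [if_pos (by omega), if_pos (by omega)]
        have hmod : PySem.Int.mod (index - (i + 3342336)) 3342336 = PySem.Int.mod (index - i) 3342336 := by omega
        rw [hmod]
        simp only [Prod.mk.injEq, Option.some.injEq, List.cons.injEq, and_true]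
        all_goals omega
      · rw [if_neg (by omega), if_neg (by omega)]
        simp only [Prod.mk.injEq, true_and]
        all_goals omega

-- ===== VERDICT (by name: the statement is the Claim_ definition above) =====
theorem get_rgba_vec_spec : Claim_equal_get_rgba_vec := by
  intro index _ hpre
  obtain ⟨h0, h1⟩ := hpre
  unfold Spec_get_rgba_vec get_rgba_vec get_rgba_vec_alt
  rw [if_neg (by omega), if_neg (by omega), if_neg (by omega), if_neg (by omega)]
  have hr := rLoop_range index 256 (le_refl _) 0
  rw [show (256 - ((256:Nat):Int)) = 0 by norm_num] at hr
  push_cast at hr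
  rw [hr]
  rw [if_pos (by omega)]
  -- compare the two mixed-radix decompositions
  have e1 := PySem.Int.floordiv_mul_add_mod (index - 0) 3342336
  have p1 := PySem.Int.mod_nonneg (index - 0) (by norm_num : (0:Int) < 3342336)
  have p2 := PySem.Int.mod_lt (index - 0) (by norm_num : (0:Int) < 3342336)
  have e2 := PySem.Int.floordiv_mul_add_mod (PySem.Int.mod (index - 0) 3342336) 13056
  have p3 := PySem.Int.mod_nonneg (PySem.Int.mod (index - 0) 3342336) (by norm_num : (0:Int) < 13056)
  have p4 := PySem.Int.mod_lt (PySem.Int.mod (index - 0) 3342336) (by norm_num : (0:Int) < 13056)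
  have e3 := PySem.Int.floordiv_mul_add_mod (PySem.Int.mod (PySem.Int.mod (index - 0) 3342336) 13056) 51
  have p5 := PySem.Int.mod_nonneg (PySem.Int.mod (PySem.Int.mod (index - 0) 3342336) 13056) (by norm_num : (0:Int) < 51)
  have p6 := PySem.Int.mod_lt (PySem.Int.mod (PySem.Int.mod (index - 0) 3342336) 13056) (by norm_num : (0:Int) < 51)
  have f1 := PySem.Int.floordiv_mul_add_mod index 51
  have q1 := PySem.Int.mod_nonneg index (by norm_num : (0:Int) < 51)
  have q2 := PySem.Int.mod_lt index (by norm_num : (0:Int) < 51)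
  have f2 := PySem.Int.floordiv_mul_add_mod (PySem.Int.floordiv index 51) 256
  have q3 := PySem.Int.mod_nonneg (PySem.Int.floordiv index 51) (by norm_num : (0:Int) < 256)
  have q4 := PySem.Int.mod_lt (PySem.Int.floordiv index 51) (by norm_num : (0:Int) < 256)
  have f3 := PySem.Int.floordiv_mul_add_mod (PySem.Int.floordiv (PySem.Int.floordiv index 51) 256) 256
  have q5 := PySem.Int.mod_nonneg (PySem.Int.floordiv (PySem.Int.floordiv index 51) 256) (by norm_num : (0:Int) < 256)
  have q6 := PySem.Int.mod_lt (PySem.Int.floordiv (PySem.Int.floordiv index 51) 256) (by norm_num : (0:Int) < 256)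
  simp only [List.cons.injEq, and_true]
  omega
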